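-- pv_equiv track=rewrite | github.com/formalsec/graphjs | detection/queries/my_utils/utils.py | get_injection_type
-- ===== SOURCE A (Python) =====
-- def get_injection_type(sink, config) -> str:
-- 	if "sinks" in config:
-- 		for injection_type, vulns in config["sinks"].items():
-- 			for vuln in vulns:
-- 				if vuln["sink"] == sink:
-- 					return injection_type
-- 	else:
-- 		raise Exception("Config file is missing the sinks")
-- ===== SOURCE B (Python) =====
-- def get_injection_type(sink, config) -> str:
-- 	if "sinks" in config:
-- 		index = {}
-- 		for injection_type, vulns in config["sinks"].items():
-- 			for vuln in vulns:
-- 				index.setdefault(vuln["sink"], injection_type)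
-- 		return index.get(sink)
-- 	else:
-- 		raise Exception("Config file is missing the sinks")
-- ===== Notes on version B (the rewrite author's own statement) =====
-- stated objective: alternative
-- what changed: Instead of a nested scan with an early return on the first matching vuln, B builds a sink->injection_type index in one pass using dict.setdefault (first occurrence wins) and answers with a single index.get(sink) lookup.
-- outside the precondition, e.g. on get_injection_type('x', {'sinks': {'t': [{'sink': 'x'}, {}]}}): A returns 't', B raises KeyError
import Mathlib
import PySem

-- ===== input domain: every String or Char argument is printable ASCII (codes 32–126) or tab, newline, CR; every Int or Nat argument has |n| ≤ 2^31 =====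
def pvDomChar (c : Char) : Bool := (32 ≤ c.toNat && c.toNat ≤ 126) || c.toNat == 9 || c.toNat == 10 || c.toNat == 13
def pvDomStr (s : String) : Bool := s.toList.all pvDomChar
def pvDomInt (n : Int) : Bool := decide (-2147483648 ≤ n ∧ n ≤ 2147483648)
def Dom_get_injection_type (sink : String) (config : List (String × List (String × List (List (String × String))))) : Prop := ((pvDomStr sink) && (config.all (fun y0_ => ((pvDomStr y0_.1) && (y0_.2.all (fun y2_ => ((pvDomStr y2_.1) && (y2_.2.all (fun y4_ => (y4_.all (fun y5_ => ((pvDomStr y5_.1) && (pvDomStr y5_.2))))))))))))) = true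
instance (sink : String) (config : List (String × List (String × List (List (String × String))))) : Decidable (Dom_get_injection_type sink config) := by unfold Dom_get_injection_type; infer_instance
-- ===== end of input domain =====

-- B replaces A's nested early-return scan by a one-pass setdefault-built sink->injection_type index plus a single lookup (alternative decomposition, same cost).


-- ===== PORT A =====
-- inner 'for vuln in vulns: if vuln["sink"] == sink: return injection_type' (the key test via Dict.get?; Pre_ guarantees the key exists)
def aScan (sink : String) : List (List (String × String)) → Bool
  | [] => false
  | v :: vs => if (PySem.Dict.mk v).get? "sink" = some sink then true else aScan sink vs

-- outer 'for injection_type, vulns in config["sinks"].items()' with early return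
def aFind (sink : String) : List (String × List (List (String × String))) → Option String
  | [] => none
  | (it, vulns) :: rest => if aScan sink vulns then some it else aFind sink rest

def get_injection_type (sink : String) (config : List (String × List (String × List (List (String × String))))) : Option String :=
  match (PySem.Dict.mk config).get? "sinks" with
  | some gs => aFind sink gs
  | none => none   -- Python raises Exception here; excluded by Pre_

-- ===== PORT B =====
-- index.setdefault(vuln["sink"], injection_type); a vuln without "sink" raises KeyError in Python (outside Pre_)
def bStep (it : String) (idx : PySem.Dict String String) (v : List (String × String)) : PySem.Dict String String :=
  match (PySem.Dict.mk v).get? "sink" with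
  | some s => idx.setdefault s it
  | none => idx

def get_injection_type_alt (sink : String) (config : List (String × List (String × List (List (String × String))))) : Option String :=
  match (PySem.Dict.mk config).get? "sinks" with
  | some gs =>
      (gs.foldl (fun idx g => g.2.foldl (bStep g.1) idx) PySem.Dict.empty).get? sink
  | none => none   -- Python raises Exception here; excluded by Pre_

-- ===== PRECONDITION & SPEC =====
-- Pre_ excludes the inputs where the Pythons raise: config without a "sinks" key (both raise Exception), and
-- vuln dicts without a "sink" key (KeyError). The second conjunct also excludes some inputs A returns on —
-- A stops at the first match and may never reach a keyless vuln, while B's full pass raises KeyError there.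
def Pre_get_injection_type (sink : String) (config : List (String × List (String × List (List (String × String))))) : Prop :=
  (PySem.Dict.mk config).contains "sinks" = true ∧
  ∀ g ∈ ((PySem.Dict.mk config).get? "sinks").getD [], ∀ v ∈ g.2, (PySem.Dict.mk v).contains "sink" = true
instance (sink : String) (config : List (String × List (String × List (List (String × String))))) : Decidable (Pre_get_injection_type sink config) := by unfold Pre_get_injection_type; infer_instance

def pvWitness_get_injection_type : String × (List (String × List (String × List (List (String × String))))) :=
  ("x", [("sinks", [("cmd", [[("sink", "x")]]), ("path", [[("sink", "y")]])])])

def Spec_get_injection_type (sink : String) (config : List (String × List (String × List (List (String × String))))) (out : Option String) : Prop := out = get_injection_type_alt sink config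
instance (sink : String) (config : List (String × List (String × List (List (String × String))))) (out : Option String) : Decidable (Spec_get_injection_type sink config out) := by unfold Spec_get_injection_type; infer_instance

-- ===== CLAIM (what is proved, stated in full; the proofs are below) =====
def Claim_equal_get_injection_type : Prop := ∀ (sink : String) (config : List (String × List (String × List (List (String × String))))), Dom_get_injection_type sink config → Pre_get_injection_type sink config → Spec_get_injection_type sink config (get_injection_type sink config)

-- ===== LEMMAS AND PROOFS =====

-- lookup in the index after the inner setdefault loop: an already-present binding wins, else the first matching vuln
theorem get?_inner (sink it : String) (vulns : List (List (String × String))) (idx : PySem.Dict String String) :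
    (vulns.foldl (bStep it) idx).get? sink =
      match idx.get? sink with
      | some w => some w
      | none => if aScan sink vulns then some it else none := by
  induction vulns generalizing idx with
  | nil => cases h : idx.get? sink <;> simp [aScan, h]
  | cons v vs ih =>
    simp only [List.foldl_cons, ih]
    cases hv : (PySem.Dict.mk v).get? "sink" with
    | none => simp [bStep, hv, aScan]
    | some s =>
      by_cases hs : s = sink
      · subst hs
        simp only [bStep, hv, PySem.Dict.get?_setdefault_self, aScan]
        cases h : idx.get? s <;> simp [h]
      · simp only [bStep, hv, PySem.Dict.get?_setdefault_of_ne idx it (Ne.symm hs), aScan]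
        cases h : idx.get? sink <;> simp [hs]

-- lookup after the whole index build equals A's first-match scan (modulo a pre-existing binding)
theorem get?_outer (sink : String) (gs : List (String × List (List (String × String)))) (idx : PySem.Dict String String) :
    (gs.foldl (fun idx g => g.2.foldl (bStep g.1) idx) idx).get? sink =
      match idx.get? sink with
      | some w => some w
      | none => aFind sink gs := by
  induction gs generalizing idx with
  | nil => cases h : idx.get? sink <;> simp [aFind, h]
  | cons g rest ih =>
    obtain ⟨it, vulns⟩ := g
    simp only [List.foldl_cons, ih, get?_inner, aFind]
    cases h : idx.get? sink with
    | some w => simp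
    | none => cases hs : aScan sink vulns <;> simp

-- ===== VERDICT (by name: the statement is the Claim_ definition above) =====
theorem get_injection_type_spec : Claim_equal_get_injection_type := by
  intro sink config _ _
  unfold Spec_get_injection_type get_injection_type get_injection_type_alt
  cases h : (PySem.Dict.mk config).get? "sinks" with
  | none => rfl
  | some gs => simp [get?_outer, PySem.Dict.get?_empty]
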